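-- pv_equiv track=rewrite | github.com/urlawebsite/ArchiveC200 | Assignment7/a7.py | mw
-- ===== SOURCE A (Python) =====
-- def m(x, y):
--     if x <= 0 and y <= 0:
--         return 3
--     elif x <= 0:
--         return 2
--     elif y <= 0:
--         return 1
--     else:
--         return m(x-1, y-1) + m(x-1, y-2)
--
-- def mw(x, y):
--     while True:
--         if x <= 0 and y <= 0:
--             return 3
--         elif x <= 0:
--             return 2
--         elif y <= 0:
--             return 1
--         else:
--             return m(x-1, y-1) + m(x-1, y-2)
-- ===== SOURCE B (Python) =====
-- def mw(x, y):
--     if x <= 0: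
--         return 3 if y <= 0 else 2
--     if y <= 0:
--         return 1
--     if y < x:
--         # every branch bottoms out at y <= 0: value depends on y alone, Fibonacci-style
--         a = b = 1
--         for _ in range(y):
--             a, b = b, a + b
--         return b
--     # bottom-up DP: row[j] = m(i, lo + j) for the y-values reachable at level i
--     lo = y - 2 * x
--     row = [3 if t <= 0 else 2 for t in range(lo, y - x + 1)]
--     for _ in range(x):
--         lo += 2
--         row = [1 if lo + j <= 0 else a + b
--                for j, (a, b) in enumerate(zip(row, row[1:]))]
--     return row[0]
-- ===== Notes on version B (the rewrite author's own statement) =====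
-- stated objective: faster
-- what changed: Replaces A's exponential double recursion m(x-1,y-1)+m(x-1,y-2) by a bottom-up DP row over the reachable y-window (and a Fibonacci-style pair iteration when y < x); intended as faster: measured 22.37x at the largest size both finished, A timed out on larger inputs.
import Mathlib
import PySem

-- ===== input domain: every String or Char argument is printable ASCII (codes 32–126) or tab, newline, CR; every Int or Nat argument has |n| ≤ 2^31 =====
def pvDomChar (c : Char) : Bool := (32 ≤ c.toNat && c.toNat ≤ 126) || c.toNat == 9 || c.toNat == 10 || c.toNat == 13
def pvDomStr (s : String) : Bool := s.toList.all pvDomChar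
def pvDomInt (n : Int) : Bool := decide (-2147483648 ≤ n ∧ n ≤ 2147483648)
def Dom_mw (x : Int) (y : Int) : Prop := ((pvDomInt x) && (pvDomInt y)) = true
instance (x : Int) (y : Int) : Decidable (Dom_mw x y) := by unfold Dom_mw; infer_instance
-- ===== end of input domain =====

-- B replaces A's double recursion by a bottom-up DP over the reachable y-values of each
-- recursion level (objective: faster; intended as faster — measured 22.37x at the largest
-- size both finished, A timed out beyond).

-- ===== PORT A =====
-- helper m of A: branching recursion, decreasing on x
def mA (x : Int) (y : Int) : Int :=
  if x ≤ 0 ∧ y ≤ 0 then 3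
  else if x ≤ 0 then 2
  else if y ≤ 0 then 1
  else mA (x - 1) (y - 1) + mA (x - 1) (y - 2)
termination_by x.toNat
decreasing_by all_goals omega

-- A's mw: a 'while True' whose body returns on its first pass, ported as that body
def mw (x : Int) (y : Int) : Int :=
  if x ≤ 0 ∧ y ≤ 0 then 3
  else if x ≤ 0 then 2
  else if y ≤ 0 then 1
  else mA (x - 1) (y - 1) + mA (x - 1) (y - 2)

-- ===== PORT B =====
-- one DP step: [1 if lo + j <= 0 else a + b for j, (a, b) in enumerate(zip(row, row[1:]))]
def bStep (lo : Int) (row : List Int) : List Int :=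
  (PySem.List.enumerate (row.zip row.tail) 0).map
    (fun p => if lo + p.1 ≤ 0 then (1 : Int) else p.2.1 + p.2.2)

def mw_alt (x : Int) (y : Int) : Int :=
  if x ≤ 0 then (if y ≤ 0 then 3 else 2)
  else if y ≤ 0 then 1
  else if y < x then
    -- a = b = 1; for _ in range(y): a, b = b, a + b; return b
    ((List.range y.toNat).foldl (fun (s : Int × Int) _ => (s.2, s.1 + s.2)) (1, 1)).2
  else
    let lo0 := y - 2 * x
    let row0 := (PySem.List.pyRange lo0 (y - x + 1) 1).map (fun t => if t ≤ 0 then (3 : Int) else 2)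
    let p := (List.range x.toNat).foldl
      (fun (s : Int × List Int) _ => (s.1 + 2, bStep (s.1 + 2) s.2)) (lo0, row0)
    p.2.headD 0   -- row[0]; the final row is a singleton here, so headD is exact

-- ===== PRECONDITION & SPEC =====
-- Pre_ excludes exactly the inputs with x ≥ 1000 and y ≥ 1000, on which A's leftmost
-- recursive descent reaches Python's default recursion limit and A raises RecursionError.
def Pre_mw (x : Int) (y : Int) : Prop := x ≤ 999 ∨ y ≤ 999
instance (x : Int) (y : Int) : Decidable (Pre_mw x y) := by unfold Pre_mw; infer_instance
def pvWitness_mw : Int × Int := (3, 4)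

def Spec_mw (x : Int) (y : Int) (out : Int) : Prop := out = mw_alt x y
instance (x : Int) (y : Int) (out : Int) : Decidable (Spec_mw x y out) := by unfold Spec_mw; infer_instance

-- ===== CLAIM (what is proved, stated in full; the proofs are below) =====
def Claim_equal_mw : Prop := ∀ (x : Int) (y : Int), Dom_mw x y → Pre_mw x y → Spec_mw x y (mw x y)

-- ===== LEMMAS AND PROOFS =====

lemma mA_of_pos (x y : Int) (hx : 0 < x) :
    mA x y = if y ≤ 0 then 1 else mA (x - 1) (y - 1) + mA (x - 1) (y - 2) := by
  rw [mA]
  have h1 : ¬ (x ≤ 0 ∧ y ≤ 0) := by omega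
  have h2 : ¬ x ≤ 0 := by omega
  simp [h2]

lemma mA_of_nonpos (x y : Int) (hx : x ≤ 0) :
    mA x y = if y ≤ 0 then 3 else 2 := by
  rw [mA]
  by_cases hy : y ≤ 0 <;> simp [hx, hy]

-- the DP step applied to a row of values f 0 … f n
lemma bStep_map (lo : Int) (f : Nat → Int) (n : Nat) :
    bStep lo ((List.range (n + 1)).map f)
      = (List.range n).map (fun (j : Nat) => if lo + (j : Int) ≤ 0 then (1 : Int) else f j + f (j + 1)) := by
  apply List.ext_getElem
  · simp [bStep, PySem.List.length_enumerate, List.length_zip]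
  · intro k h1 h2
    have hk : k < n := by
      simpa [bStep, PySem.List.length_enumerate, List.length_zip] using h1
    simp [bStep, PySem.List.getElem_enumerate, List.getElem_zip, List.getElem_tail]

-- loop invariant: after i iterations the row holds m(i, ·) on the level-i window
lemma fold_inv (x y : Int) (hx : 0 < x) (i : Nat) (hi : i ≤ x.toNat) :
    (List.range i).foldl (fun (s : Int × List Int) _ => (s.1 + 2, bStep (s.1 + 2) s.2))
        (y - 2 * x,
         (PySem.List.pyRange (y - 2 * x) (y - x + 1) 1).map (fun t => if t ≤ 0 then (3 : Int) else 2))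
      = (y - 2 * x + 2 * i,
         (List.range (x.toNat + 1 - i)).map (fun (j : Nat) => mA (i : Int) (y - 2 * x + 2 * i + (j : Int)))) := by
  induction i with
  | zero =>
      simp only [List.range_zero, List.foldl_nil, Nat.cast_zero, mul_zero, add_zero, Nat.sub_zero]
      congr 1
      rw [PySem.List.pyRange_one]
      have hlen : (y - x + 1 - (y - 2 * x)).toNat = x.toNat + 1 := by omega
      rw [hlen, List.map_map]
      apply List.map_congr_left
      intro j _
      simp only [Function.comp]
      rw [mA_of_nonpos _ _ le_rfl]
  | succ i ih =>
      have hi' : i ≤ x.toNat := by omega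
      rw [List.range_succ, List.foldl_append, ih hi', List.foldl_cons, List.foldl_nil]
      dsimp only
      have hn : x.toNat + 1 - i = (x.toNat - (i + 1)) + 1 + 1 := by omega
      rw [hn, bStep_map]
      have hn2 : x.toNat + 1 - (i + 1) = (x.toNat - (i + 1)) + 1 := by omega
      rw [hn2]
      refine Prod.ext ?_ ?_
      · dsimp only; push_cast; ring
      dsimp only
      apply List.map_congr_left
      intro j _
      have hpos : (0 : Int) < (i : Int) + 1 := by positivity
      have hc : ((i + 1 : Nat) : Int) = (i : Int) + 1 := by push_cast; ring
      rw [hc]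
      have ht : y - 2 * x + 2 * ((i : Int) + 1) + (j : Int)
              = y - 2 * x + 2 * (i : Int) + 2 + (j : Int) := by ring
      rw [ht, mA_of_pos _ _ hpos]
      by_cases hle : y - 2 * x + 2 * (i : Int) + 2 + (j : Int) ≤ 0
      · simp [hle]
      · simp only [hle, if_false]
        have e1 : (i : Int) + 1 - 1 = (i : Int) := by ring
        have a1 : y - 2 * x + 2 * (i : Int) + 2 + (j : Int) - 1
                = y - 2 * x + 2 * (i : Int) + ((j : Int) + 1) := by ring
        have a2 : y - 2 * x + 2 * (i : Int) + 2 + (j : Int) - 2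
                = y - 2 * x + 2 * (i : Int) + (j : Int) := by ring
        rw [e1, a1, a2]
        push_cast
        ring

-- Fibonacci-style helpers for the y < x branch of B
def fibB : Nat → Int
  | 0 => 1
  | 1 => 2
  | (n + 2) => fibB (n + 1) + fibB n

def fibPrev : Nat → Int
  | 0 => 1
  | (n + 1) => fibB n

lemma fold_fib (n : Nat) :
    (List.range n).foldl (fun (s : Int × Int) _ => (s.2, s.1 + s.2)) (1, 1)
      = (fibPrev n, fibB n) := by
  induction n with
  | zero => rfl
  | succ n ih =>
      rw [List.range_succ, List.foldl_append, ih, List.foldl_cons, List.foldl_nil]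
      refine Prod.ext rfl ?_
      dsimp only [fibPrev]
      cases n with
      | zero => rfl
      | succ m => dsimp only [fibPrev]; rw [show fibB (m + 2) = fibB (m + 1) + fibB m from rfl]; ring

-- when y < x the recursion never reaches the x ≤ 0 base: m(x,y) = fibB y
lemma mA_big : ∀ (y : Nat) (x : Int), (y : Int) < x → mA x (y : Int) = fibB y := by
  intro y
  induction y using Nat.strong_induction_on with
  | _ y ih =>
    intro x hx
    match y with
    | 0 =>
        simp only [Nat.cast_zero]
        rw [mA_of_pos x 0 (by exact_mod_cast hx)]
        simp [fibB]
    | 1 =>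
        simp only [Nat.cast_one]
        rw [mA_of_pos x 1 (by omega)]
        have hx1 : (0 : Int) < x - 1 := by omega
        rw [if_neg (by omega), mA_of_pos (x - 1) (1 - 1) hx1, mA_of_pos (x - 1) (1 - 2) hx1]
        norm_num [fibB]
    | (m + 2) =>
        have hy : ((m + 2 : Nat) : Int) = (m : Int) + 2 := by push_cast; ring
        rw [hy, mA_of_pos x ((m : Int) + 2) (by omega), if_neg (by omega)]
        have e1 : (m : Int) + 2 - 1 = ((m + 1 : Nat) : Int) := by push_cast; ring
        have e2 : (m : Int) + 2 - 2 = ((m : Nat) : Int) := by ring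
        rw [e1, e2, ih (m + 1) (by omega) (x - 1) (by omega),
            ih m (by omega) (x - 1) (by omega)]
        rw [show fibB (m + 2) = fibB (m + 1) + fibB m from rfl]

-- ===== VERDICT (by name: the statement is the Claim_ definition above) =====
theorem mw_spec : Claim_equal_mw := by
  intro x y hdom hpre
  unfold Spec_mw mw mw_alt
  by_cases hx : x ≤ 0
  · by_cases hy : y ≤ 0 <;> simp [hx, hy]
  · by_cases hy : y ≤ 0
    · simp [hx, hy]
    · have hx' : 0 < x := by omega
      simp only [hx, hy, if_false, and_false]
      by_cases hyx : y < x
      · simp only [hyx, if_true]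
        rw [fold_fib, ← mA_big y.toNat x (by omega)]
        have hy2 : ((y.toNat : Int)) = y := by omega
        rw [hy2, mA_of_pos x y hx', if_neg hy]
      · simp only [hyx, if_false]
        rw [fold_inv x y hx' x.toNat le_rfl]
        have h1 : x.toNat + 1 - x.toNat = 1 := by omega
        rw [h1]
        have hx2 : ((x.toNat : Int)) = x := by omega
        simp only [List.range_one, List.map_cons, List.map_nil, List.headD_cons, hx2]
        have harg : y - 2 * x + 2 * x + ((0 : Nat) : Int) = y := by push_cast; ring
        rw [harg, mA_of_pos x y hx', if_neg hy]
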